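-- pv_equiv track=rewrite | github.com/Moealfadil/IEEEXtereme18.0 | Xtereme/Rectangles_and_arrays.py | maxRectangleWithModification
-- ===== SOURCE A (Python) =====
-- def largestRectangleArea(heights):
--     stack = []
--     max_area = 0
--     heights.append(0)  # Append a height of 0 to flush out the stack at the end
--
--     for i in range(len(heights)):
--         while stack and heights[stack[-1]] > heights[i]:
--             h = heights[stack.pop()]
--             width = i if not stack else i - stack[-1] - 1
--             max_area = max(max_area, h * width)
--         stack.append(i)
--
--     return max_area
--
-- def maxRectangleWithModification(N, X, A):
--     # Step 1: Calculate the maximum area without modification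
--     max_area = largestRectangleArea(A[:])
--
--     # Step 2: Calculate potential max area with modification
--     for i in range(N):
--         if A[i] < X:  # Only modify if it's beneficial
--             original_height = A[i]
--             A[i] = X
--
--             # Calculate area with this modification
--             modified_area = largestRectangleArea(A)
--             max_area = max(max_area, modified_area)
--
--             # Restore the original height
--             A[i] = original_height
--
--     return max_area
-- ===== SOURCE B (Python) =====
-- def maxRectangleWithModification(N, X, A):
--     def best(hs):
--         b = 0
--         n = len(hs)
--         for l in range(n):
--             m = hs[l]
--             for r in range(l, n):
--                 if hs[r] < m:
--                     m = hs[r]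
--                 a = m * (r - l + 1)
--                 if a > b:
--                     b = a
--         return b
--     res = best(A)
--     for i in range(N):
--         if A[i] < X:
--             c = best(A[:i] + [X] + A[i + 1:])
--             if c > res:
--                 res = c
--     return res
-- ===== Notes on version B (the rewrite author's own statement) =====
-- stated objective: simpler
-- what changed: A's monotonic-stack histogram scan with in-place modify/restore (which also mutates A by appending zeros) is replaced by a side-effect-free brute-force maximum over all windows with a running minimum, applied to the base array and to each sliced one-bar modification.
-- outside the precondition, e.g. on maxRectangleWithModification(2, 5, [1]): A returns 5, B raises IndexError; on maxRectangleWithModification(2, 0, [1]): A raises IndexError, B raises IndexError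
import Mathlib
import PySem

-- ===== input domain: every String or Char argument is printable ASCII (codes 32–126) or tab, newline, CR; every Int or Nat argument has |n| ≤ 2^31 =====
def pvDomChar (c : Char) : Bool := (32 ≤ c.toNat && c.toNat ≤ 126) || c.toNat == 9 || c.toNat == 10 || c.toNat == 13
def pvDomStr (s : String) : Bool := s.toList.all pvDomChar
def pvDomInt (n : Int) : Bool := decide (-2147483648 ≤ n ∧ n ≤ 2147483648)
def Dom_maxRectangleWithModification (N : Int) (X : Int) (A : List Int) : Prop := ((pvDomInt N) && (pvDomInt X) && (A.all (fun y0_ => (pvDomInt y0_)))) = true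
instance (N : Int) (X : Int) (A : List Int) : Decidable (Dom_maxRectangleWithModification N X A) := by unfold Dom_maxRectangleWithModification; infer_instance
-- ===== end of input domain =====

-- B replaces A's monotonic-stack scan with in-place modify/restore by a side-effect-free
-- brute-force maximum over all windows (objective: simpler).  NOTE: the Python A mutates its
-- argument A (it appends a 0 to it for every modified candidate); the equivalence proved here
-- is about the RETURN value only, and the port threads that mutation through its state.

-- ===== PORT A =====
-- Python indexing `heights[stack[-1]]`, `heights[i]` is always in range in A; ported with getD
-- (exact on every executed path).

-- `i if not stack else i - stack[-1] - 1`
def pvWidth (i : Nat) (rest : List Nat) : Int :=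
  match rest with
  | [] => (i : Int)
  | s :: _ => (i : Int) - (s : Int) - 1

-- the inner `while stack and heights[stack[-1]] > heights[i]` loop (stack head = Python stack[-1])
def popPhase (f : Nat → Int) (i : Nat) : List Nat → Int → List Nat × Int
  | [], m => ([], m)
  | t :: rest, m =>
    if f i < f t then popPhase f i rest (max m (f t * pvWidth i rest))
    else (t :: rest, m)

-- one iteration of `for i in range(len(heights))`
def lraStep (f : Nat → Int) (s : List Nat × Int) (i : Nat) : List Nat × Int :=
  let r := popPhase f i s.1 s.2
  (i :: r.1, r.2)

def lraRun (f : Nat → Int) (n : Nat) : Int :=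
  ((List.range n).foldl (lraStep f) ([], 0)).2

-- `largestRectangleArea` on the list AFTER its own `heights.append(0)`
def largestRectangleArea (heights : List Int) : Int :=
  let hs := heights ++ [0]
  lraRun (fun j => hs.getD j 0) hs.length

-- one iteration of A's `for i in range(N)`: modify A[i], call largestRectangleArea(A)
-- (which appends a 0 to the shared list), take the max, restore A[i]
def modStepA (X : Int) (s : List Int × Int) (i : Nat) : List Int × Int :=
  if s.1.getD i 0 < X then
    let orig := s.1.getD i 0
    let cur1 := s.1.set i X
    let area := largestRectangleArea cur1
    ((cur1 ++ [0]).set i orig, max s.2 area)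
  else s

def maxRectangleWithModification (N : Int) (X : Int) (A : List Int) : Int :=
  -- Step 1 runs on the copy A[:], so it does not mutate A
  ((List.range N.toNat).foldl (modStepA X) (A, largestRectangleArea A)).2

-- ===== PORT B =====
-- brute force: for every left end l, scan right ends r keeping the running minimum
def bestHist (hs : List Int) : Int :=
  (List.range hs.length).foldl
    (fun b l =>
      ((List.range (hs.length - l)).foldl
        (fun (p : Int × Int) k =>
          let v := hs.getD (l + k) 0
          let m := if v < p.1 then v else p.1
          let a := m * (((l + k : Nat) : Int) - ((l : Nat) : Int) + 1)
          (m, if p.2 < a then a else p.2))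
        (hs.getD l 0, b)).2)
    0

-- one iteration of B's `for i in range(N)`; `A[:i] + [X] + A[i+1:]` = take/cons/drop (0 ≤ i < len(A))
def modStepB (X : Int) (A : List Int) (res : Int) (i : Nat) : Int :=
  if A.getD i 0 < X then
    let c := bestHist (A.take i ++ X :: A.drop (i + 1))
    if res < c then c else res
  else res

def maxRectangleWithModification_alt (N : Int) (X : Int) (A : List Int) : Int :=
  (List.range N.toNat).foldl (modStepB X A) (bestHist A)

-- ===== PRECONDITION & SPEC =====
-- Pre_ excludes N > len(A): there A either raises IndexError, or returns a value computed from
-- the zeros its own earlier calls appended to A (an artefact of A's in-place mutation), and B's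
-- slicing naturally raises IndexError on all such inputs.
def Pre_maxRectangleWithModification (N : Int) (X : Int) (A : List Int) : Prop :=
  N ≤ (A.length : Int)
instance (N : Int) (X : Int) (A : List Int) : Decidable (Pre_maxRectangleWithModification N X A) := by
  unfold Pre_maxRectangleWithModification; infer_instance

def pvWitness_maxRectangleWithModification : Int × Int × List Int := (3, 2, [1, 0, 4])

def Spec_maxRectangleWithModification (N : Int) (X : Int) (A : List Int) (out : Int) : Prop :=
  out = maxRectangleWithModification_alt N X A
instance (N : Int) (X : Int) (A : List Int) (out : Int) : Decidable (Spec_maxRectangleWithModification N X A out) := by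
  unfold Spec_maxRectangleWithModification; infer_instance

-- ===== CLAIM (what is proved, stated in full; the proofs are below) =====
def Claim_equal_maxRectangleWithModification : Prop :=
  ∀ (N : Int) (X : Int) (A : List Int), Dom_maxRectangleWithModification N X A →
    Pre_maxRectangleWithModification N X A →
    Spec_maxRectangleWithModification N X A (maxRectangleWithModification N X A)

-- ===== LEMMAS AND PROOFS =====

-- total indexing: both ports only index inside the list; zeros appended by A are invisible to it
def idx (hs : List Int) (j : Nat) : Int := hs.getD j 0

-- minimum of f over the window [l, l+k]
def wminAux (f : Nat → Int) (l : Nat) : Nat → Int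
  | 0 => f l
  | k + 1 => min (wminAux f l k) (f (l + k + 1))

-- minimum of f over [l, r]  (meaningful for l ≤ r)
def wmin (f : Nat → Int) (l r : Nat) : Int := wminAux f l (r - l)

-- area of the window [l, r]
def wval (f : Nat → Int) (l r : Nat) : Int := wmin f l r * ((r : Int) - (l : Int) + 1)

def allVals (f : Nat → Int) (n : Nat) : List Int :=
  (List.range n).flatMap (fun l => (List.range (n - l)).map (fun k => wval f l (l + k)))

-- the common specification: max(0, max over all windows [l,r] ⊆ [0,n) of min·width)
def wspec (f : Nat → Int) (n : Nat) : Int := (allVals f n).foldl max 0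

-- ---- foldl max toolbox ----
theorem foldl_max_init (l : List Int) (b : Int) : b ≤ l.foldl max b := by
  induction l generalizing b with
  | nil => exact le_refl b
  | cons x t ih => exact le_trans (le_max_left b x) (ih (max b x))

theorem foldl_max_mem (l : List Int) (b a : Int) (h : a ∈ l) : a ≤ l.foldl max b := by
  induction l generalizing b with
  | nil => cases h
  | cons x t ih =>
    rcases List.mem_cons.mp h with h | h
    · subst h; exact le_trans (le_max_right b a) (foldl_max_init t (max b a))
    · exact ih (max b x) h

theorem foldl_max_cases (l : List Int) (b : Int) : l.foldl max b = b ∨ l.foldl max b ∈ l := by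
  induction l generalizing b with
  | nil => exact Or.inl rfl
  | cons x t ih =>
    rcases ih (max b x) with h | h
    · rcases max_cases b x with ⟨h1, _⟩ | ⟨h1, _⟩
      · exact Or.inl (by simpa [List.foldl, h1] using h)
      · exact Or.inr (by simp [List.foldl]; left; rw [h, h1])
    · exact Or.inr (by simp [List.foldl]; right; exact h)

theorem foldl_max_flatMap (g : Nat → List Int) (xs : List Nat) (b : Int) :
    (xs.flatMap g).foldl max b = xs.foldl (fun b x => (g x).foldl max b) b := by
  induction xs generalizing b with
  | nil => rfl
  | cons x t ih => simp [List.flatMap_cons, List.foldl_append, ih]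

-- ---- wmin toolbox ----
theorem wminAux_le (f : Nat → Int) (l : Nat) : ∀ k x, x ≤ k → wminAux f l k ≤ f (l + x) := by
  intro k
  induction k with
  | zero => intro x hx; interval_cases x; simp [wminAux]
  | succ k ih =>
    intro x hx
    rcases Nat.lt_or_ge x (k + 1) with h | h
    · exact le_trans (min_le_left _ _) (ih x (Nat.lt_succ_iff.mp h))
    · have : x = k + 1 := le_antisymm hx h
      subst this
      simpa [wminAux, Nat.add_assoc] using min_le_right (wminAux f l k) (f (l + k + 1))

theorem le_wminAux (f : Nat → Int) (l : Nat) (c : Int) :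
    ∀ k, (∀ x, x ≤ k → c ≤ f (l + x)) → c ≤ wminAux f l k := by
  intro k
  induction k with
  | zero => intro h; simpa [wminAux] using h 0 (le_refl 0)
  | succ k ih =>
    intro h
    refine le_min (ih fun x hx => h x (Nat.le_succ_of_le hx)) ?_
    simpa [Nat.add_assoc] using h (k + 1) (le_refl _)

theorem wmin_le (f : Nat → Int) (l r x : Nat) (h1 : l ≤ x) (h2 : x ≤ r) :
    wmin f l r ≤ f x := by
  have hx : x = l + (x - l) := by omega
  rw [hx]
  exact wminAux_le f l (r - l) (x - l) (by omega)

theorem le_wmin (f : Nat → Int) (l r : Nat) (c : Int) (hlr : l ≤ r)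
    (h : ∀ x, l ≤ x → x ≤ r → c ≤ f x) : c ≤ wmin f l r := by
  exact le_wminAux f l c (r - l) fun x hx => h (l + x) (by omega) (by omega)

theorem wmin_eq (f : Nat → Int) (l r t : Nat) (h1 : l ≤ t) (h2 : t ≤ r)
    (h : ∀ x, l ≤ x → x ≤ r → f t ≤ f x) : wmin f l r = f t :=
  le_antisymm (wmin_le f l r t h1 h2) (le_wmin f l r (f t) (le_trans h1 h2) h)

theorem wmin_self (f : Nat → Int) (l : Nat) : wmin f l l = f l := by
  simp [wmin, wminAux]

theorem wmin_succ (f : Nat → Int) (l r : Nat) (h : l ≤ r) :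
    wmin f l (r + 1) = min (wmin f l r) (f (r + 1)) := by
  have h1 : r + 1 - l = (r - l) + 1 := by omega
  have h2 : l + (r - l) + 1 = r + 1 := by omega
  rw [wmin, h1]
  simp [wminAux, h2, wmin]

theorem wminAux_left (f : Nat → Int) (l : Nat) :
    ∀ k, wminAux f l (k + 1) = min (f l) (wminAux f (l + 1) k) := by
  intro k
  induction k with
  | zero => simp [wminAux]
  | succ k ih =>
    show min (wminAux f l (k + 1)) (f (l + (k + 1) + 1)) = _
    rw [ih, min_assoc]
    have : l + (k + 1) + 1 = (l + 1) + k + 1 := by omega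
    simp [wminAux, this]

theorem wmin_leftmost (f : Nat → Int) : ∀ d l, ∃ j, l ≤ j ∧ j ≤ l + d ∧
    f j = wmin f l (l + d) ∧ ∀ x, l ≤ x → x < j → wmin f l (l + d) < f x := by
  intro d
  induction d with
  | zero => intro l; exact ⟨l, le_refl l, by omega, (wmin_self f l).symm, by omega⟩
  | succ d ih =>
    intro l
    have hw : wmin f l (l + (d + 1)) = min (f l) (wmin f (l + 1) (l + 1 + d)) := by
      have h1 : l + (d + 1) - l = d + 1 := by omega
      have h2 : l + 1 + d - (l + 1) = d := by omega
      rw [wmin, h1, wminAux_left, wmin, h2]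
    rcases ih (l + 1) with ⟨j, hj1, hj2, hj3, hj4⟩
    by_cases hc : f l ≤ wmin f (l + 1) (l + 1 + d)
    · refine ⟨l, le_refl l, by omega, ?_, by omega⟩
      rw [hw, min_eq_left hc]
    · rw [not_le] at hc
      refine ⟨j, by omega, by omega, ?_, ?_⟩
      · rw [hw, min_eq_right (le_of_lt hc), hj3]
      · intro x hx1 hx2
        rw [hw, min_eq_right (le_of_lt hc)]
        rcases Nat.eq_or_lt_of_le hx1 with h | h
        · rw [← h]; exact hc
        · exact hj4 x h hx2

-- ---- wspec toolbox ----
theorem wspec_nonneg (f : Nat → Int) (n : Nat) : 0 ≤ wspec f n :=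
  foldl_max_init _ 0

theorem wval_mem_allVals (f : Nat → Int) (n l r : Nat) (h1 : l ≤ r) (h2 : r < n) :
    wval f l r ∈ allVals f n := by
  unfold allVals
  rw [List.mem_flatMap]
  refine ⟨l, List.mem_range.mpr (by omega), ?_⟩
  rw [List.mem_map]
  exact ⟨r - l, List.mem_range.mpr (by omega), by rw [Nat.add_sub_cancel' h1]⟩

theorem wspec_ge (f : Nat → Int) (n l r : Nat) (h1 : l ≤ r) (h2 : r < n) :
    wval f l r ≤ wspec f n :=
  foldl_max_mem _ 0 _ (wval_mem_allVals f n l r h1 h2)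

theorem wspec_cases (f : Nat → Int) (n : Nat) :
    wspec f n = 0 ∨ ∃ l r, l ≤ r ∧ r < n ∧ wspec f n = wval f l r := by
  rcases foldl_max_cases (allVals f n) 0 with h | h
  · exact Or.inl h
  · right
    unfold allVals at h
    rw [List.mem_flatMap] at h
    rcases h with ⟨l, hl, hm⟩
    rw [List.mem_map] at hm
    rcases hm with ⟨k, hk, he⟩
    rw [List.mem_range] at hl hk
    exact ⟨l, l + k, by omega, by omega, he.symm⟩

theorem wval_nonpos (f : Nat → Int) (l r : Nat) (h1 : l ≤ r) (h2 : wmin f l r ≤ 0) :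
    wval f l r ≤ 0 := by
  have hw : (0 : Int) ≤ (r : Int) - (l : Int) + 1 := by
    have : (l : Int) ≤ (r : Int) := by exact_mod_cast h1
    omega
  exact mul_nonpos_iff.mpr (Or.inr ⟨h2, hw⟩)

theorem wspec_succ (f : Nat → Int) (n : Nat) (h : f n ≤ 0) : wspec f (n + 1) = wspec f n := by
  apply le_antisymm
  · rcases wspec_cases f (n + 1) with hc | ⟨l, r, h1, h2, h3⟩
    · rw [hc]; exact wspec_nonneg f n
    · rw [h3]
      rcases Nat.lt_or_ge r n with hr | hr
      · exact wspec_ge f n l r h1 hr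
      · have hrn : r = n := by omega
        subst hrn
        exact le_trans
          (wval_nonpos f l r h1 (le_trans (wmin_le f l r r h1 (le_refl r)) h))
          (wspec_nonneg f r)
  · rcases wspec_cases f n with hc | ⟨l, r, h1, h2, h3⟩
    · rw [hc]; exact wspec_nonneg f (n + 1)
    · rw [h3]; exact wspec_ge f (n + 1) l r h1 (by omega)

theorem wspec_add_zeros (f : Nat → Int) (n : Nat) (h : ∀ x, n ≤ x → f x = 0) :
    ∀ k, wspec f (n + k) = wspec f n := by
  intro k
  induction k with
  | zero => rfl
  | succ k ih => rw [← Nat.add_assoc, wspec_succ f (n + k) (by rw [h (n + k) (by omega)]), ih]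

-- ---- idx toolbox ----
theorem idx_out (hs : List Int) (j : Nat) (h : hs.length ≤ j) : idx hs j = 0 := by
  simp [idx, List.getD, List.getElem?_eq_none_iff.mpr h]

theorem idx_append_zeros (hs : List Int) (k : Nat) :
    (fun j => idx (hs ++ List.replicate k 0) j) = idx hs := by
  funext j
  rcases Nat.lt_or_ge j hs.length with h | h
  · show (hs ++ List.replicate k 0).getD j 0 = hs.getD j 0
    exact List.getD_append _ _ _ _ h
  · rw [idx_out hs j h]
    show (hs ++ List.replicate k 0).getD j 0 = 0
    rw [List.getD, List.getElem?_append_right h, List.getElem?_replicate]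
    split <;> rfl

-- ---- B side: bestHist computes wspec ----
theorem bestHist_inner (hs : List Int) (l : Nat) (b : Int) :
    ∀ c, 1 ≤ c →
      (List.range c).foldl
        (fun (p : Int × Int) k =>
          let v := hs.getD (l + k) 0
          let m := if v < p.1 then v else p.1
          let a := m * (((l + k : Nat) : Int) - ((l : Nat) : Int) + 1)
          (m, if p.2 < a then a else p.2))
        (hs.getD l 0, b)
      = (wmin (idx hs) l (l + c - 1),
         ((List.range c).map (fun k => wval (idx hs) l (l + k))).foldl max b) := by
  intro c
  induction c with
  | zero => omega
  | succ c ih =>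
    intro _
    rcases Nat.eq_zero_or_pos c with hc | hc
    · subst hc
      have hm : (if hs.getD (l + 0) 0 < hs.getD l 0 then hs.getD (l + 0) 0 else hs.getD l 0)
          = wmin (idx hs) l (l + 1 - 1) := by
        simp [wmin_self, idx]
      simp only [List.range_succ, List.range_zero, List.foldl_append, List.foldl_nil,
        List.nil_append, List.map_append, List.map_nil, List.map_cons, List.foldl_cons]
      simp [hm, wval, wmin_self, idx, max_def]
      split <;> split <;> omega
    · have h1 : 1 ≤ c := hc
      rw [List.range_succ, List.foldl_append, ih h1, List.map_append, List.foldl_append]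
      simp only [List.foldl_cons, List.foldl_nil, List.map_cons, List.map_nil]
      have hmm : (if hs.getD (l + c) 0 < wmin (idx hs) l (l + c - 1)
          then hs.getD (l + c) 0 else wmin (idx hs) l (l + c - 1))
          = wmin (idx hs) l (l + c) := by
        have : l + c = (l + c - 1) + 1 := by omega
        rw [this, wmin_succ (idx hs) l (l + c - 1) (by omega), ← this]
        simp [idx, min_def]
        split <;> split <;> omega
      rw [hmm]
      have hval : wmin (idx hs) l (l + c) * (((l + c : Nat) : Int) - ((l : Nat) : Int) + 1)
          = wval (idx hs) l (l + c) := by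
        simp [wval]
      rw [Prod.mk.injEq]
      refine ⟨by rw [show l + (c + 1) - 1 = l + c from by omega], ?_⟩
      rw [hval, max_def]
      split <;> split <;> omega

theorem bestHist_eq (hs : List Int) : bestHist hs = wspec (idx hs) hs.length := by
  unfold bestHist wspec allVals
  rw [foldl_max_flatMap]
  apply PySem.List.foldl_congr_mem
  intro b l hl
  have hl' : l < hs.length := List.mem_range.mp hl
  rw [bestHist_inner hs l b (hs.length - l) (by omega)]

-- ---- A side: the stack invariants ----
-- relation along the stack (head = top): lower index, lower-or-equal height, gap strictly higher
def RS (f : Nat → Int) (a b : Nat) : Prop :=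
  b < a ∧ f b ≤ f a ∧ ∀ x, b < x → x < a → f a < f x

-- everything before the bottom stack element is strictly higher
def BotP (f : Nat → Int) (st : List Nat) : Prop :=
  ∀ j ∈ st.getLast?, ∀ x, x < j → f j < f x

def StOK (f : Nat → Int) (i : Nat) (st : List Nat) : Prop :=
  st.IsChain (RS f) ∧ BotP f st ∧ ∀ j ∈ st, j < i

-- what is known about the indices strictly between the stack top and the current index i
def Cov (f : Nat → Int) (i : Nat) : List Nat → Prop
  | [] => ∀ x, x < i → f i < f x
  | t :: _ => ∀ x, t < x → x < i → f t ≤ f x ∧ f i < f x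

theorem popPhase_mono (f : Nat → Int) (i : Nat) :
    ∀ st m, m ≤ (popPhase f i st m).2 := by
  intro st
  induction st with
  | nil => intro m; exact le_refl m
  | cons t rest ih =>
    intro m
    by_cases h : f i < f t
    · simp only [popPhase, if_pos h]
      exact le_trans (le_max_left _ _) (ih _)
    · simp [popPhase, if_neg h]

theorem popPhase_stop (f : Nat → Int) (i : Nat) :
    ∀ st m, (popPhase f i st m).1 = [] ∨
      ∃ t rest, (popPhase f i st m).1 = t :: rest ∧ ¬ f i < f t := by
  intro st
  induction st with
  | nil => intro m; exact Or.inl rfl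
  | cons t rest ih =>
    intro m
    by_cases h : f i < f t
    · simp only [popPhase, if_pos h]; exact ih _
    · exact Or.inr ⟨t, rest, by simp [popPhase, if_neg h], h⟩

theorem popPhase_through (f : Nat → Int) (i : Nat) :
    ∀ pre j rest m, (∀ t ∈ pre, f i < f t) → f i < f j →
      f j * pvWidth i rest ≤ (popPhase f i (pre ++ j :: rest) m).2 := by
  intro pre
  induction pre with
  | nil =>
    intro j rest m _ hj
    simp only [List.nil_append, popPhase, if_pos hj]
    exact le_trans (le_max_right _ _) (popPhase_mono f i _ _)
  | cons p pre ih =>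
    intro j rest m hp hj
    have hfp : f i < f p := hp p (by simp)
    simp only [List.cons_append, popPhase, if_pos hfp]
    exact ih j rest _ (fun t ht => hp t (by simp [ht])) hj

theorem popPhase_keep (f : Nat → Int) (i j : Nat) (hj : f j ≤ f i) :
    ∀ st m, j ∈ st → j ∈ (popPhase f i st m).1 := by
  intro st
  induction st with
  | nil => intro m h; cases h
  | cons t rest ih =>
    intro m hm
    by_cases h : f i < f t
    · have hjt : j ≠ t := by intro he; rw [he] at hj; omega
      simp only [popPhase, if_pos h]
      refine ih _ ?_
      rcases List.mem_cons.mp hm with h' | h'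
      · exact absurd h' hjt
      · exact h'
    · simpa [popPhase, if_neg h] using hm

theorem isChain_RS_le (f : Nat → Int) :
    ∀ (l : List Nat) (t j : Nat), (t :: l).IsChain (RS f) → j ∈ l → f j ≤ f t ∧ j < t := by
  intro l
  induction l with
  | nil => intro t j _ h; cases h
  | cons b l ih =>
    intro t j hc hj
    have hrel : RS f t b := (List.isChain_cons_cons.mp hc).1
    rcases List.mem_cons.mp hj with h | h
    · subst h; exact ⟨hrel.2.1, hrel.1⟩
    · have := ih b j (List.isChain_cons_cons.mp hc).2 h
      exact ⟨le_trans this.1 hrel.2.1, lt_trans this.2 hrel.1⟩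

-- the one-pop preservation core, bundled for reuse
theorem popPhase_inv (f : Nat → Int) (n i : Nat) (hi : i < n) :
    ∀ st m, StOK f i st → Cov f i st → m ≤ wspec f n →
      StOK f i (popPhase f i st m).1 ∧ Cov f i (popPhase f i st m).1 ∧
      (popPhase f i st m).2 ≤ wspec f n := by
  intro st
  induction st with
  | nil => intro m h1 h2 h3; exact ⟨h1, h2, h3⟩
  | cons t rest ih =>
    intro m hok hcov hm
    by_cases hc : f i < f t
    · simp only [popPhase, if_pos hc]
      have hti : t < i := hok.2.2 t (by simp)
      -- the emitted candidate is the value of a genuine window with minimum f t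
      have hcand : f t * pvWidth i rest ≤ wspec f n := by
        cases rest with
        | nil =>
          have hbot : ∀ x, x < t → f t < f x := by
            have := hok.2.1
            simp [BotP] at this
            exact this
          have hmin : wmin f 0 (i - 1) = f t := by
            apply wmin_eq f 0 (i - 1) t (by omega) (by omega)
            intro x _ hx2
            rcases Nat.lt_trichotomy x t with h | h | h
            · exact le_of_lt (hbot x h)
            · rw [h]
            · exact (hcov x h (by omega)).1
          have : wval f 0 (i - 1) = f t * pvWidth i [] := by
            rw [wval, hmin, pvWidth]
            have : ((i - 1 : Nat) : Int) = (i : Int) - 1 := by omega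
            rw [this]; ring
          rw [← this]
          exact wspec_ge f n 0 (i - 1) (by omega) (by omega)
        | cons s rest' =>
          have hrel : RS f t s := (List.isChain_cons_cons.mp hok.1).1
          have hst2 : s < t := hrel.1
          have hmin : wmin f (s + 1) (i - 1) = f t := by
            apply wmin_eq f (s + 1) (i - 1) t (by omega) (by omega)
            intro x hx1 hx2
            rcases Nat.lt_trichotomy x t with h | h | h
            · exact le_of_lt (hrel.2.2 x (by omega) h)
            · rw [h]
            · exact (hcov x h (by omega)).1
          have hval : wval f (s + 1) (i - 1) = f t * pvWidth i (s :: rest') := by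
            rw [wval, hmin, pvWidth]
            have h1 : ((i - 1 : Nat) : Int) = (i : Int) - 1 := by omega
            have h2 : ((s + 1 : Nat) : Int) = (s : Int) + 1 := by push_cast; ring
            rw [h1, h2]; ring
          rw [← hval]
          exact wspec_ge f n (s + 1) (i - 1) (by omega) (by omega)
      have hm' : max m (f t * pvWidth i rest) ≤ wspec f n := max_le hm hcand
      -- the invariants survive the pop
      have hok' : StOK f i rest := by
        refine ⟨hok.1.tail, ?_, fun j hj => hok.2.2 j (by simp [hj])⟩
        cases rest with
        | nil => intro j hj; simp at hj
        | cons s rest' =>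
          intro j hj
          exact hok.2.1 j (by rwa [List.getLast?_cons_cons])
      have hcov' : Cov f i rest := by
        cases rest with
        | nil =>
          intro x hx
          rcases Nat.lt_trichotomy x t with h | h | h
          · have hbot : ∀ y, y < t → f t < f y := by
              have := hok.2.1
              simp [BotP] at this
              exact this
            exact lt_trans hc (hbot x h)
          · rw [h]; exact hc
          · exact (hcov x h hx).2
        | cons s rest' =>
          intro x hx1 hx2
          have hrel : RS f t s := (List.isChain_cons_cons.mp hok.1).1
          rcases Nat.lt_trichotomy x t with h | h | h
          · have h1 : f t < f x := hrel.2.2 x hx1 h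
            exact ⟨le_of_lt (lt_of_le_of_lt hrel.2.1 h1), lt_trans hc h1⟩
          · rw [h]; exact ⟨hrel.2.1, hc⟩
          · have := hcov x h hx2
            exact ⟨le_trans hrel.2.1 this.1, this.2⟩
      exact ih _ hok' hcov' hm'
    · simpa [popPhase, if_neg hc] using ⟨hok, hcov, hm⟩

def StateInv (f : Nat → Int) (n i : Nat) (s : List Nat × Int) : Prop :=
  StOK f i s.1 ∧ ((s.1 = [] ∧ i = 0) ∨ ∃ rest, s.1 = (i - 1) :: rest) ∧
    0 ≤ s.2 ∧ s.2 ≤ wspec f n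

theorem cov_of_stateInv (f : Nat → Int) (n i : Nat) (s : List Nat × Int)
    (h : StateInv f n i s) : Cov f i s.1 := by
  rcases h.2.1 with ⟨he, hi⟩ | ⟨rest, he⟩
  · rw [he, hi]; intro x hx; omega
  · rw [he]; intro x hx1 hx2; omega

theorem stateInv_step (f : Nat → Int) (n i : Nat) (hi : i < n) (s : List Nat × Int)
    (h : StateInv f n i s) : StateInv f n (i + 1) (lraStep f s i) := by
  obtain ⟨hok', hcov', hm'⟩ :=
    popPhase_inv f n i hi s.1 s.2 h.1 (cov_of_stateInv f n i s h) h.2.2.2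
  rcases popPhase_stop f i s.1 s.2 with hstop | ⟨t, rest, hstop, hnt⟩
  · refine ⟨⟨?_, ?_, ?_⟩, Or.inr ⟨[], by simp [lraStep, hstop]⟩,
      le_trans h.2.2.1 (popPhase_mono f i s.1 s.2), hm'⟩
    · simp [lraStep, hstop]
    · simp only [lraStep, hstop]
      intro j hj x hx
      simp at hj
      rw [← hj] at hx ⊢
      rw [hstop] at hcov'
      exact hcov' x hx
    · simp only [lraStep, hstop]
      intro j hj
      simp at hj
      omega
  · refine ⟨⟨?_, ?_, ?_⟩, Or.inr ⟨t :: rest, by simp [lraStep, hstop]⟩,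
      le_trans h.2.2.1 (popPhase_mono f i s.1 s.2), hm'⟩
    · simp only [lraStep, hstop]
      rw [List.isChain_cons_cons]
      refine ⟨⟨?_, not_lt.mp hnt, ?_⟩, by rw [← hstop]; exact hok'.1⟩
      · exact hok'.2.2 t (by rw [hstop]; simp)
      · intro x hx1 hx2
        rw [hstop] at hcov'
        exact (hcov' x hx1 hx2).2
    · simp only [lraStep, hstop]
      intro j hj x hx
      rw [List.getLast?_cons_cons, ← hstop] at hj
      exact hok'.2.1 j hj x hx
    · simp only [lraStep, hstop]
      intro j hj
      rcases List.mem_cons.mp hj with hj | hj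
      · omega
      · have : j ∈ (popPhase f i s.1 s.2).1 := by rw [hstop]; simp [hj]
        have := hok'.2.2 j this
        omega

def lraState (f : Nat → Int) (i : Nat) : List Nat × Int :=
  (List.range i).foldl (lraStep f) ([], 0)

theorem lraState_succ (f : Nat → Int) (i : Nat) :
    lraState f (i + 1) = lraStep f (lraState f i) i := by
  simp [lraState, List.range_succ]

theorem lraState_inv (f : Nat → Int) (n : Nat) :
    ∀ i, i ≤ n → StateInv f n i (lraState f i) := by
  intro i
  induction i with
  | zero =>
    intro _
    refine ⟨⟨List.IsChain.nil, ?_, ?_⟩, Or.inl ⟨rfl, rfl⟩, le_refl 0, wspec_nonneg f n⟩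
    · intro j hj; simp [lraState] at hj
    · intro j hj; simp [lraState] at hj
  | succ i ih =>
    intro hn
    rw [lraState_succ]
    exact stateInv_step f n i (by omega) _ (ih (by omega))

theorem lraState_m_mono (f : Nat → Int) : ∀ i j, i ≤ j →
    (lraState f i).2 ≤ (lraState f j).2 := by
  intro i j hij
  induction j with
  | zero => have : i = 0 := by omega
            rw [this]
  | succ j ih =>
    rcases Nat.eq_or_lt_of_le hij with h | h
    · rw [h]
    · refine le_trans (ih (by omega)) ?_
      rw [lraState_succ]
      exact popPhase_mono f j _ _

theorem lraRun_le_wspec (f : Nat → Int) (n : Nat) : lraRun f n ≤ wspec f n :=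
  (lraState_inv f n n (le_refl n)).2.2.2

theorem lraRun_nonneg (f : Nat → Int) (n : Nat) : 0 ≤ lraRun f n :=
  (lraState_inv f n n (le_refl n)).2.2.1

-- j stays on the stack until the first later index with a strictly smaller height
theorem lraState_mem (f : Nat → Int) (j i₀ : Nat)
    (hmin : ∀ x, j < x → x < i₀ → f j ≤ f x) :
    ∀ i, j < i → i ≤ i₀ → j ∈ (lraState f i).1 := by
  intro i
  induction i with
  | zero => omega
  | succ i ih =>
    intro h1 h2
    rcases Nat.eq_or_lt_of_le (Nat.succ_le_of_lt h1) with h | h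
    · -- i = j : step j pushes j
      have hj : j = i := by omega
      rw [lraState_succ, hj]
      simp [lraStep]
    · -- j < i : j survives the pops of step i since f j ≤ f i
      have hji : j < i := by omega
      have hfi : f j ≤ f i := hmin i hji (by omega)
      rw [lraState_succ]
      simp only [lraStep]
      exact List.mem_cons_of_mem i (popPhase_keep f i j hfi _ _ (ih hji (by omega)))

theorem wspec_le_lraRun (f : Nat → Int) (n : Nat) (hn : 0 < n) (h0 : f (n - 1) = 0) :
    wspec f n ≤ lraRun f n := by
  rcases wspec_cases f n with hc | ⟨l, r, hlr, hrn, hs⟩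
  · rw [hc]; exact lraRun_nonneg f n
  · rw [hs]
    by_cases hw : wmin f l r ≤ 0
    · exact le_trans (wval_nonpos f l r hlr hw) (lraRun_nonneg f n)
    · push_neg at hw
      -- j : the leftmost position of the window minimum
      obtain ⟨j, hj1, hj2, hj3, hj4⟩ := by
        have := wmin_leftmost f (r - l) l
        rwa [Nat.add_sub_cancel' hlr] at this
      have hfj : 0 < f j := by rw [hj3]; exact hw
      have hjn : j < n - 1 := by
        rcases Nat.lt_or_ge j (n - 1) with h | h
        · exact h
        · have : j = n - 1 := by omega
          rw [this, h0] at hfj; omega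
      -- i₀ : the first index after j with a strictly smaller height
      have hP : ∃ x, j < x ∧ f x < f j := ⟨n - 1, hjn, by rw [h0]; omega⟩
      obtain ⟨i₀, ⟨hji₀, hfi₀⟩, hi₀min⟩ :
          ∃ i₀, (j < i₀ ∧ f i₀ < f j) ∧ ∀ x, x < i₀ → ¬(j < x ∧ f x < f j) :=
        ⟨Nat.find hP, Nat.find_spec hP, fun x hx => Nat.find_min hP hx⟩
      have hi₀n : i₀ ≤ n - 1 := by
        by_contra hcon
        exact hi₀min (n - 1) (by omega) ⟨hjn, by rw [h0]; omega⟩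
      have hmono : ∀ x, j < x → x < i₀ → f j ≤ f x := by
        intro x hx1 hx2
        by_contra hcon
        exact hi₀min x hx2 ⟨hx1, by omega⟩
      have hri : r < i₀ := by
        by_contra hcon
        have h1 : wmin f l r ≤ f i₀ := wmin_le f l r i₀ (by omega) (by omega)
        rw [← hj3] at h1
        omega
      -- at step i₀, j is still on the stack
      have hmem : j ∈ (lraState f i₀).1 := lraState_mem f j i₀ hmono i₀ hji₀ (le_refl i₀)
      obtain ⟨pre, rest, hst⟩ := List.append_of_mem hmem
      have hok : StOK f i₀ (lraState f i₀).1 := (lraState_inv f n i₀ (by omega)).1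
      -- everything above j on the stack is at least as high as j, hence higher than f i₀
      have hpre : ∀ t ∈ pre, f i₀ < f t := by
        intro t ht
        obtain ⟨p1, p2, hp⟩ := List.append_of_mem ht
        have hsuf : (t :: (p2 ++ j :: rest)).IsChain (RS f) := by
          refine hok.1.suffix ⟨p1, ?_⟩
          rw [hst, hp]
          simp
        have hle : f j ≤ f t :=
          (isChain_RS_le f (p2 ++ j :: rest) t j hsuf (by simp)).1
        omega
      -- the pop of j at step i₀ emits a candidate at least as large as the window value
      have hcand : f j * pvWidth i₀ rest ≤ (lraState f (i₀ + 1)).2 := by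
        rw [lraState_succ]
        show f j * pvWidth i₀ rest ≤ (popPhase f i₀ (lraState f i₀).1 (lraState f i₀).2).2
        rw [hst]
        exact popPhase_through f i₀ pre j rest _ hpre hfi₀
      -- the emitted width covers the optimal window
      have hwidth : (r : Int) - (l : Int) + 1 ≤ pvWidth i₀ rest := by
        cases rest with
        | nil =>
          show (r : Int) - (l : Int) + 1 ≤ (i₀ : Int)
          have : (r : Int) < (i₀ : Int) := by exact_mod_cast hri
          have : (0 : Int) ≤ (l : Int) := Int.natCast_nonneg l
          omega
        | cons s rest' =>
          have hsuf : (j :: s :: rest').IsChain (RS f) := by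
            refine hok.1.suffix ⟨pre, ?_⟩
            rw [hst]
          have hrel : RS f j s := (List.isChain_cons_cons.mp hsuf).1
          have hsl : s < l := by
            by_contra hcon
            have h1 : wmin f l r < f s := hj4 s (by omega) hrel.1
            have h2 : f s ≤ f j := hrel.2.1
            rw [hj3] at h2
            omega
          show (r : Int) - (l : Int) + 1 ≤ (i₀ : Int) - (s : Int) - 1
          have c1 : (r : Int) < (i₀ : Int) := by exact_mod_cast hri
          have c2 : (s : Int) < (l : Int) := by exact_mod_cast hsl
          omega
      have hfinal : f j * pvWidth i₀ rest ≤ lraRun f n := by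
        refine le_trans hcand ?_
        exact lraState_m_mono f (i₀ + 1) n (by omega)
      refine le_trans ?_ hfinal
      rw [wval, ← hj3]
      exact mul_le_mul_of_nonneg_left hwidth (le_of_lt hfj)

theorem lraRun_eq_wspec (f : Nat → Int) (n : Nat) (hn : 0 < n) (h0 : f (n - 1) = 0) :
    lraRun f n = wspec f n :=
  le_antisymm (lraRun_le_wspec f n) (wspec_le_lraRun f n hn h0)

-- appended zeros are invisible: largestRectangleArea on hs ++ 0^k computes wspec of hs
theorem lra_zeros (hs : List Int) (k : Nat) :
    largestRectangleArea (hs ++ List.replicate k 0) = wspec (idx hs) hs.length := by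
  show lraRun (fun j => ((hs ++ List.replicate k 0) ++ [0]).getD j 0)
      ((hs ++ List.replicate k 0) ++ [0]).length = _
  have h1 : (hs ++ List.replicate k 0) ++ [0] = hs ++ List.replicate (k + 1) 0 := by
    rw [List.append_assoc, ← List.replicate_succ']
  have h2 : (fun j => (hs ++ List.replicate (k + 1) (0 : Int)).getD j 0) = idx hs :=
    idx_append_zeros hs (k + 1)
  rw [h1]
  show lraRun (fun j => idx (hs ++ List.replicate (k + 1) 0) j) _ = _
  rw [show (fun j => idx (hs ++ List.replicate (k + 1) (0:Int)) j) = idx hs from h2]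
  have hlen : (hs ++ List.replicate (k + 1) (0 : Int)).length = hs.length + (k + 1) := by simp
  rw [hlen, lraRun_eq_wspec (idx hs) (hs.length + (k + 1)) (by omega)
      (idx_out hs _ (by omega))]
  exact wspec_add_zeros (idx hs) hs.length (fun x hx => idx_out hs x hx) (k + 1)

theorem lra_eq (hs : List Int) : largestRectangleArea hs = wspec (idx hs) hs.length := by
  have := lra_zeros hs 0
  simpa using this

-- the two outer loops agree, step by step; the A-side list is always A plus a tail of zeros
theorem outer_eq (X : Int) (A : List Int) :
    ∀ (l : List Nat), (∀ i ∈ l, i < A.length) → ∀ (k : Nat) (m : Int),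
      (l.foldl (modStepA X) (A ++ List.replicate k 0, m)).2 = l.foldl (modStepB X A) m := by
  intro l
  induction l with
  | nil => intro _ k m; rfl
  | cons i tl ih =>
    intro hmem k m
    have hi : i < A.length := hmem i (by simp)
    have hget : (A ++ List.replicate k (0 : Int)).getD i 0 = A.getD i 0 :=
      List.getD_append _ _ _ _ hi
    simp only [List.foldl_cons, modStepA, modStepB, hget]
    by_cases hc : A.getD i 0 < X
    · rw [if_pos hc, if_pos hc]
      have hset : (A ++ List.replicate k (0 : Int)).set i X = A.set i X ++ List.replicate k 0 :=
        List.set_append_left _ _ hi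
      have harea : largestRectangleArea ((A ++ List.replicate k (0 : Int)).set i X)
          = wspec (idx (A.set i X)) A.length := by
        rw [hset, lra_zeros, List.length_set]
      have hrestore : (((A ++ List.replicate k (0 : Int)).set i X ++ [0]).set i (A.getD i 0))
          = A ++ List.replicate (k + 1) 0 := by
        rw [hset, List.append_assoc, ← List.replicate_succ',
            List.set_append_left _ _ (by simpa using hi),
            List.set_set, List.getD_eq_getElem A 0 hi, List.set_getElem_self]
      have hbest : bestHist (A.take i ++ X :: A.drop (i + 1))
          = wspec (idx (A.set i X)) A.length := by
        rw [← List.set_eq_take_cons_drop X hi, bestHist_eq, List.length_set]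
      rw [harea, hrestore, hbest]
      have hmax : (if m < wspec (idx (A.set i X)) A.length
          then wspec (idx (A.set i X)) A.length else m)
          = max m (wspec (idx (A.set i X)) A.length) := by
        rw [max_def]; split <;> split <;> omega
      rw [hmax]
      exact ih (fun x hx => hmem x (by simp [hx])) (k + 1) _
    · rw [if_neg hc, if_neg hc]
      exact ih (fun x hx => hmem x (by simp [hx])) k m

-- ===== VERDICT (by name: the statement is the Claim_ definition above) =====
theorem maxRectangleWithModification_spec : Claim_equal_maxRectangleWithModification := by
  intro N X A _ hpre
  unfold Spec_maxRectangleWithModification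
  unfold maxRectangleWithModification maxRectangleWithModification_alt
  have hN : N.toNat ≤ A.length := by
    unfold Pre_maxRectangleWithModification at hpre
    omega
  have hmem : ∀ i ∈ List.range N.toNat, i < A.length := by
    intro i hi
    have := List.mem_range.mp hi
    omega
  have h0 := outer_eq X A (List.range N.toNat) hmem 0 (largestRectangleArea A)
  simp only [List.replicate_zero, List.append_nil] at h0
  rw [h0, lra_eq, ← bestHist_eq]
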